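-- pv_equiv track=rewrite | github.com/Ruanrodrigues20/p1 | mini_test/uni 06/encontros_vocalicos.py | encontros_vocalicos
-- ===== SOURCE A (Python) =====
-- def meu_in(ele, seq):
--     for e in seq:
--         if e == ele:
--             return True
--     return False
--
-- def encontros_vocalicos(string):
--     vogais = 'aeiou'
--     s_aux = ''
--     lista = []
--     for car in string:
--         if meu_in(car.lower(), vogais):
--             s_aux += car
--         else:
--             if len(s_aux) >= 2:
--                 lista.append(s_aux)
--             s_aux= ''
--     if len(s_aux) >= 2:
--         lista.append(s_aux)
--     return lista
-- ===== SOURCE B (Python) =====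
-- def encontros_vocalicos(string):
--     vogais = 'aeiou'
--     res = []
--     i, n = 0, len(string)
--     while i < n:
--         k = string[i].lower() in vogais
--         j = i + 1
--         while j < n and (string[j].lower() in vogais) == k:
--             j += 1
--         if k and j - i >= 2:
--             res.append(string[i:j])
--         i = j
--     return res
-- ===== Notes on version B (the rewrite author's own statement) =====
-- stated objective: alternative
-- what changed: B segments the string into maximal vowel/non-vowel runs with a two-pointer scan and slices each qualifying vowel run out directly, instead of A's character-by-character loop with an incremental string accumulator and a separate post-loop flush.
import Mathlib
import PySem

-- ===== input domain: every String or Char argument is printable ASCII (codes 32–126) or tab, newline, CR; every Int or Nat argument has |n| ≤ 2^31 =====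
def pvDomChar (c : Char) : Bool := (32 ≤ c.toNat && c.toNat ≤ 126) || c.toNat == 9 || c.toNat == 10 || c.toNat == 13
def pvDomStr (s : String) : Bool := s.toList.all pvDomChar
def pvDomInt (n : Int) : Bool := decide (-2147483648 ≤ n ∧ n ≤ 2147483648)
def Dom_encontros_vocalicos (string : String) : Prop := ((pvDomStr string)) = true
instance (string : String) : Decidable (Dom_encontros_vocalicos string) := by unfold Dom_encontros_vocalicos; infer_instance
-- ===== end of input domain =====

-- B replaces A's character-by-character accumulator loop (with its post-loop flush) by a
-- run-segmentation scan: split into maximal vowel/non-vowel runs, keep vowel runs of length ≥ 2.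

-- ===== PORT A =====
def meu_in (ele : Char) (seq : List Char) : Bool :=
  match seq with
  | [] => false
  | e :: s => if e == ele then true else meu_in ele s

def aLoop (chars : List Char) (s_aux : List Char) (lista : List String) : List Char × List String :=
  match chars with
  | [] => (s_aux, lista)
  | car :: cs =>
    if meu_in (PySem.Chars.lowerChar car) "aeiou".toList then
      aLoop cs (s_aux ++ [car]) lista
    else
      aLoop cs [] (if 2 ≤ s_aux.length then lista ++ [String.ofList s_aux] else lista)

def encontros_vocalicos (string : String) : List String :=
  let r := aLoop string.toList [] []
  if 2 ≤ r.1.length then r.2 ++ [String.ofList r.1] else r.2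

-- ===== PORT B =====
def isVog (c : Char) : Bool := ("aeiou".toList).contains (PySem.Chars.lowerChar c)

def bGo (chars : List Char) : List String :=
  match chars with
  | [] => []
  | c :: cs =>
    let k := isVog c
    let run := c :: cs.takeWhile (fun x => isVog x == k)
    let rest := cs.dropWhile (fun x => isVog x == k)
    (if k && 2 ≤ run.length then [String.ofList run] else []) ++ bGo rest
termination_by chars.length
decreasing_by
  simp only [List.length_cons]
  exact Nat.lt_succ_of_le (List.length_dropWhile_le _ _)

def encontros_vocalicos_alt (string : String) : List String := bGo string.toList

-- ===== PRECONDITION & SPEC =====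
def Spec_encontros_vocalicos (string : String) (out : List String) : Prop := out = encontros_vocalicos_alt string
instance (string : String) (out : List String) : Decidable (Spec_encontros_vocalicos string out) := by unfold Spec_encontros_vocalicos; infer_instance

-- ===== CLAIM (what is proved, stated in full; the proofs are below) =====
def Claim_equal_encontros_vocalicos : Prop := ∀ (string : String), Dom_encontros_vocalicos string → Spec_encontros_vocalicos string (encontros_vocalicos string)

-- ===== LEMMAS AND PROOFS =====

-- the items A emits from state s_aux over the remaining characters (including the final flush)
def aGo (s_aux : List Char) (chars : List Char) : List String :=
  match chars with
  | [] => if 2 ≤ s_aux.length then [String.ofList s_aux] else []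
  | c :: cs =>
    if isVog c then aGo (s_aux ++ [c]) cs
    else (if 2 ≤ s_aux.length then [String.ofList s_aux] else []) ++ aGo [] cs

def flushA (r : List Char × List String) : List String :=
  if 2 ≤ r.1.length then r.2 ++ [String.ofList r.1] else r.2

theorem meu_in_eq_contains (ele : Char) (seq : List Char) :
    meu_in ele seq = seq.contains ele := by
  induction seq with
  | nil => rfl
  | cons e s ih =>
    simp only [meu_in, List.contains_cons]
    cases h : e == ele with
    | true => simp [BEq.comm] at h ⊢; simp [h]
    | false => simp [BEq.comm] at h ⊢; simp [h, ih, List.contains_eq_mem]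

theorem aLoop_eq_aGo (chars : List Char) (s_aux : List Char) (lista : List String) :
    flushA (aLoop chars s_aux lista) = lista ++ aGo s_aux chars := by
  induction chars generalizing s_aux lista with
  | nil => simp [aLoop, aGo, flushA]; split_ifs <;> simp
  | cons c cs ih =>
    simp only [aLoop, aGo, meu_in_eq_contains]
    have hk : ("aeiou".toList).contains (PySem.Chars.lowerChar c) = isVog c := rfl
    rw [hk]
    cases h : isVog c with
    | true => simp [ih]
    | false => simp [ih]; split_ifs <;> simp

theorem aGo_skip (chars : List Char) :
    aGo [] chars = aGo [] (chars.dropWhile (fun x => !isVog x)) := by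
  induction chars with
  | nil => rfl
  | cons c cs ih =>
    cases h : isVog c with
    | true => simp [h]
    | false => simp [h, ← ih, aGo]

theorem aGo_vowel (chars : List Char) (s_aux : List Char) :
    aGo s_aux chars =
      (if 2 ≤ (s_aux ++ chars.takeWhile isVog).length
        then [String.ofList (s_aux ++ chars.takeWhile isVog)] else []) ++
      aGo [] (chars.dropWhile isVog) := by
  induction chars generalizing s_aux with
  | nil => simp [aGo]
  | cons c cs ih =>
    cases h : isVog c with
    | true =>
      simp only [aGo, h, if_true, List.takeWhile_cons, List.dropWhile_cons, ih]
      simp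
    | false =>
      simp only [aGo, h, List.takeWhile_cons, List.dropWhile_cons]
      simp [aGo, h]

theorem aGo_nil_eq_bGo_aux (n : Nat) : ∀ (chars : List Char), chars.length ≤ n → aGo [] chars = bGo chars := by
  induction n with
  | zero =>
    intro chars hle
    have : chars = [] := List.eq_nil_of_length_eq_zero (Nat.le_zero.mp hle)
    subst this
    simp [aGo, bGo]
  | succ n ih =>
    intro chars hle
    match chars with
    | [] => simp [aGo, bGo]
    | c :: cs =>
      cases h : isVog c with
      | true =>
        have hp : (fun x => isVog x == isVog c) = isVog := by
          funext x; simp [h]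
        have h1 : aGo [] (c :: cs) = aGo [c] cs := by simp [aGo, h]
        rw [h1, aGo_vowel]
        have hrec : aGo [] (cs.dropWhile isVog) = bGo (cs.dropWhile isVog) := by
          apply ih
          have := List.length_dropWhile_le isVog cs
          simp only [List.length_cons] at hle
          omega
        rw [hrec, bGo, hp, h]
        simp
      | false =>
        have hp : (fun x => isVog x == isVog c) = (fun x => !isVog x) := by
          funext x; simp [h]
        have h1 : aGo [] (c :: cs) = aGo [] cs := by simp [aGo, h]
        rw [h1, aGo_skip cs]
        have hrec : aGo [] (cs.dropWhile (fun x => !isVog x)) = bGo (cs.dropWhile (fun x => !isVog x)) := by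
          apply ih
          have := List.length_dropWhile_le (fun x => !isVog x) cs
          simp only [List.length_cons] at hle
          omega
        rw [hrec, bGo, hp, h]
        simp

theorem aGo_nil_eq_bGo (chars : List Char) : aGo [] chars = bGo chars :=
  aGo_nil_eq_bGo_aux chars.length chars (Nat.le_refl _)

-- ===== VERDICT (by name: the statement is the Claim_ definition above) =====
theorem encontros_vocalicos_spec : Claim_equal_encontros_vocalicos := by
  intro s _
  show encontros_vocalicos s = encontros_vocalicos_alt s
  have h := aLoop_eq_aGo s.toList [] []
  simp only [flushA, List.nil_append] at h
  calc encontros_vocalicos s = aGo [] s.toList := h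
    _ = bGo s.toList := aGo_nil_eq_bGo _
    _ = encontros_vocalicos_alt s := rfl
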